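-- pv_equiv track=rewrite | github.com/Yolwoocle/tp | tp05/ex03_somme_maximale_q2.py | deux_maxima
-- ===== SOURCE A (Python) =====
-- def deux_maxima(tab):
--   assert len(tab)>=2, 'Pré-condition'
--   # m2 < m1
--   m1 = tab[0]
--   m2 = tab[1]
--   if m1 < m2:
--     m1, m2 = m2, m1
--   for i in range(2, len(tab)):
--     if tab[i] > m1:
--       m2 = m1
--       m1 = tab[i]
--     elif tab[i] > m2:
--       m2 = tab[i]
--   return (m1, m2)
-- ===== SOURCE B (Python) =====
-- def deux_maxima(tab):
--   assert len(tab)>=2, 'Pré-condition'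
--   s = sorted(tab, reverse=True)
--   return (s[0], s[1])
-- ===== Notes on version B (the rewrite author's own statement) =====
-- stated objective: simpler
-- what changed: Replaces the single-pass running-max selection loop with sorting the list in descending order and taking its first two elements.
import Mathlib
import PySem

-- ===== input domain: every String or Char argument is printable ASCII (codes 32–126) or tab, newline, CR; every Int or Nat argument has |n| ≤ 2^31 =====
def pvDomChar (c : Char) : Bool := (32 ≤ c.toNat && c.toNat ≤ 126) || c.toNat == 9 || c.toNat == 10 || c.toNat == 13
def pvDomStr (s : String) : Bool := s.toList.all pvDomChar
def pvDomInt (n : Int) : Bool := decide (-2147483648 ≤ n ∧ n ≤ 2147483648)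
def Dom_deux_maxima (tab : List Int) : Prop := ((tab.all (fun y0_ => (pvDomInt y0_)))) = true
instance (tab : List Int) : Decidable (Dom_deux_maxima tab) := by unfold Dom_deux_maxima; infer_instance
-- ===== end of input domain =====

-- B replaces A's single-pass running-max selection with a descending sort plus taking the
-- first two elements (objective: simpler). Both assert len(tab) >= 2; Pre_ excludes shorter lists.

-- ===== PORT A =====
-- the loop body of A, over state (m1, m2)
def dmStep (m : Int × Int) (x : Int) : Int × Int :=
  if x > m.1 then (x, m.1) else if x > m.2 then (m.1, x) else m

def deux_maxima (tab : List Int) : Int × Int :=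
  match tab with
  | a :: b :: rest => rest.foldl dmStep (if a < b then (b, a) else (a, b))
  | _ => (0, 0)  -- assert fails in Python: outside Pre_

-- ===== PORT B =====
def deux_maxima_alt (tab : List Int) : Int × Int :=
  -- s = sorted(tab, reverse=True); return (s[0], s[1]); asserts (fails outside Pre_) ported as the default 0
  let s := PySem.List.sorted tab (fun x => x) true
  ((PySem.List.pyGet? s 0).getD 0, (PySem.List.pyGet? s 1).getD 0)

-- ===== PRECONDITION & SPEC =====
-- A raises AssertionError (as does B) on lists of fewer than two elements.
def Pre_deux_maxima (tab : List Int) : Prop := 2 ≤ tab.length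
instance (tab : List Int) : Decidable (Pre_deux_maxima tab) := by unfold Pre_deux_maxima; infer_instance
def pvWitness_deux_maxima : List Int := [1, 2]
def Spec_deux_maxima (tab : List Int) (out : Int × Int) : Prop := out = deux_maxima_alt tab
instance (tab : List Int) (out : Int × Int) : Decidable (Spec_deux_maxima tab out) := by unfold Spec_deux_maxima; infer_instance

-- ===== CLAIM (what is proved, stated in full; the proofs are below) =====
def Claim_equal_deux_maxima : Prop := ∀ (tab : List Int), Dom_deux_maxima tab → Pre_deux_maxima tab → Spec_deux_maxima tab (deux_maxima tab)

-- ===== LEMMAS AND PROOFS =====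

-- The "top-two insertion" step lifted to an Option state covering 0/1/≥2 elements seen so far.
def dmOStep (s : Option (Int × Option Int)) (x : Int) : Option (Int × Option Int) :=
  match s with
  | none => some (x, none)
  | some (p, none) => if x > p then some (x, some p) else some (p, some x)
  | some (p, some q) => if x > p then some (x, some p) else if x > q then some (p, some x) else some (p, some q)

theorem dmOStep_comm (s : Option (Int × Option Int)) (x y : Int) :
    dmOStep (dmOStep s x) y = dmOStep (dmOStep s y) x := by
  rcases s with _ | ⟨p, _ | q⟩ <;>
    simp only [dmOStep] <;>
    (try split_ifs) <;>
    (try simp only [dmOStep]) <;>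
    (try split_ifs) <;>
    (try simp_all only [Option.some.injEq, Prod.mk.injEq]) <;>
    (try simp_all) <;>
    omega

theorem dmOStep_full (p q x : Int) :
    dmOStep (some (p, some q)) x = some ((dmStep (p, q) x).1, some (dmStep (p, q) x).2) := by
  simp only [dmOStep, dmStep]
  split_ifs <;> simp_all

theorem foldl_dmOStep_full (l : List Int) (p q : Int) :
    l.foldl dmOStep (some (p, some q)) =
      some ((l.foldl dmStep (p, q)).1, some (l.foldl dmStep (p, q)).2) := by
  induction l generalizing p q with
  | nil => rfl
  | cons x t ih =>
      simp only [List.foldl_cons, dmOStep_full]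
      exact ih _ _

theorem foldl_dmOStep_le (l : List Int) (p q : Int) (hqp : q ≤ p)
    (h : ∀ x ∈ l, x ≤ q) : l.foldl dmOStep (some (p, some q)) = some (p, some q) := by
  induction l with
  | nil => rfl
  | cons x t ih =>
      have hx : x ≤ q := h x (by simp)
      have : dmOStep (some (p, some q)) x = some (p, some q) := by
        simp only [dmOStep]; split_ifs <;> first | rfl | omega
      simp only [List.foldl_cons, this]
      exact ih (fun y hy => h y (by simp [hy]))

-- A's result, lifted: fold of dmOStep from none over the whole list.
theorem deux_maxima_lift (a b : Int) (rest : List Int) :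
    (a :: b :: rest).foldl dmOStep none =
      some ((deux_maxima (a :: b :: rest)).1, some (deux_maxima (a :: b :: rest)).2) := by
  simp only [List.foldl_cons]
  have h2' : dmOStep (dmOStep none a) b =
      some ((if a < b then ((b : Int), (a : Int)) else (a, b)).1, some (if a < b then ((b : Int), (a : Int)) else (a, b)).2) := by
    simp only [dmOStep]
    split_ifs <;> simp_all
  rw [h2', foldl_dmOStep_full]
  rfl

-- ===== VERDICT (by name: the statement is the Claim_ definition above) =====
theorem deux_maxima_spec : Claim_equal_deux_maxima := by
  intro tab _hdom hpre
  unfold Spec_deux_maxima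
  match htab : tab with
  | a :: b :: rest =>
    -- the sorted list
    have hperm : (PySem.List.sorted tab (fun x => x) true).Perm tab := PySem.List.sorted_perm ..
    have hlen : (PySem.List.sorted tab (fun x => x) true).length = tab.length := hperm.length_eq
    subst htab
    match hs : PySem.List.sorted (a :: b :: rest) (fun x => x) true with
    | [] => simp [hs] at hlen
    | [s0] => simp [hs] at hlen
    | s0 :: s1 :: srest =>
      rw [hs] at hperm hlen
      have hpw : (s0 :: s1 :: srest).Pairwise (fun u v => (fun x => x) v ≤ (fun x => x) u) := by
        rw [← hs]; exact PySem.List.sorted_pairwise_rev ..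
      simp only [List.pairwise_cons] at hpw
      have h10 : s1 ≤ s0 := hpw.1 s1 (by simp)
      have hrest1 : ∀ x ∈ srest, x ≤ s1 := fun x hx => hpw.2.1 x hx
      -- fold of the lifted step over the sorted list is (s0, s1)
      have hsortedfold : (s0 :: s1 :: srest).foldl dmOStep none = some (s0, some s1) := by
        have h01 : dmOStep (dmOStep none s0) s1 = some (s0, some s1) := by
          simp only [dmOStep]; split_ifs <;> first | rfl | omega
        simp only [List.foldl_cons, h01]
        exact foldl_dmOStep_le srest s0 s1 h10 hrest1
      -- permutation invariance of the lifted fold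
      have hcomm : ∀ x ∈ (s0 :: s1 :: srest), ∀ y ∈ (s0 :: s1 :: srest),
          ∀ z, dmOStep (dmOStep z x) y = dmOStep (dmOStep z y) x :=
        fun x _ y _ z => dmOStep_comm z x y
      have hfold : (s0 :: s1 :: srest).foldl dmOStep none = (a :: b :: rest).foldl dmOStep none :=
        hperm.foldl_eq' hcomm none
      have hA := deux_maxima_lift a b rest
      rw [← hfold, hsortedfold] at hA
      simp only [Option.some.injEq, Prod.mk.injEq] at hA
      obtain ⟨h1, h2⟩ := hA
      have hz : (0:Int) ≤ (srest.length:Int) + 1 := by omega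
      simp only [deux_maxima_alt, hs, Prod.ext_iff]
      constructor
      · simp [PySem.List.pyGet?, PySem.List.pyIdx?, hz, h1]
      · simp [PySem.List.pyGet?, PySem.List.pyIdx?, h2]
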